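-- pv_equiv track=rewrite | github.com/meanna/Experimente_Evaluierung | 9_Parser/tree_reader.py | remove_chain_rules
-- ===== SOURCE A (Python) =====
-- def remove_chain_rules(constituents):
--     """
--     Sort the given constituent list to have an order of depth first traversal.
--     Remove chain rules from the given constituent list.
--     input e.g. [('TOP', 0, 5), ('S', 0, 5), ('NP', 0, 2), ('NNP', 0, 1) .. ]
--     output e.g. [('TOP=S', 0, 5), ('NP', 0, 2), ('NNP', 0, 1), ..]
--
--     """
--     constituents = sorted(constituents, key=lambda x: (x[1], -x[2]))
--     final_constituents = []
--     i = 0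
--     while i <= len(constituents) - 1:
--
--         label, start, end = constituents[i]
--         chain_labels = [label]
--         for j in range(i + 1, len(constituents)):
--             next_label, next_start, next_end = constituents[j]
--             if next_start == start and next_end == end:
--                 chain_labels.append(next_label)
--             else:
--                 break
--         chain_labels.reverse()
--
--         merged_label = "=".join(chain_labels)
--
--         con = (merged_label, start, end)
--         final_constituents.append(con)
--         i += len(chain_labels)
--     return final_constituents
-- ===== SOURCE B (Python) =====
-- def remove_chain_rules(constituents):
--     # Two staged passes: build an insertion-ordered table mapping each span
--     # (start, end) to the labels seen on it in sorted order, then emit one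
--     # merged constituent per table entry.
--     table = {}
--     for label, start, end in sorted(constituents, key=lambda x: (x[1], -x[2])):
--         table.setdefault((start, end), []).append(label)
--     return [("=".join(reversed(labels)), start, end)
--             for (start, end), labels in table.items()]
-- ===== Notes on version B (the rewrite author's own statement) =====
-- stated objective: simpler
-- what changed: Replaces A's index-jumping while-loop with an inner run-scanning for/break by two staged passes: a dict keyed by span accumulating labels, then an emission pass over the dict's items.
import Mathlib
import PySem

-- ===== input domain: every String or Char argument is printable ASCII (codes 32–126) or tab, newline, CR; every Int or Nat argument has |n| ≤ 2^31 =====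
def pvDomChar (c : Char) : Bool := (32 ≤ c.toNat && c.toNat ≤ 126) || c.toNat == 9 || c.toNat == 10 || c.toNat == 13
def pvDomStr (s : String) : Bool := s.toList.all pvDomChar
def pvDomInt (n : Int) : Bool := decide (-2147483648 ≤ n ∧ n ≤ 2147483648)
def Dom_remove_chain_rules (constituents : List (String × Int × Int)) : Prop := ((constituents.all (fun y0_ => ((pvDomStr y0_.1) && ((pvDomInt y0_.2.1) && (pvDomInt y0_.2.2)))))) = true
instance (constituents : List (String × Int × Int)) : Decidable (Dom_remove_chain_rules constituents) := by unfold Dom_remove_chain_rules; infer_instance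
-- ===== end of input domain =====

-- B replaces A's index-jumping while-loop (inner scan with break, skip by run length) by two
-- staged passes: a span-keyed insertion-ordered table of labels, then an emission pass (simpler).

-- ===== PORT A =====
-- A's while loop: take the run of following constituents with the same (start, end),
-- emit the reversed chain joined with '=', and jump i past the run.
def pvALoop : List (String × Int × Int) → List (String × Int × Int)
  | [] => []
  | (label, start, «end») :: rest =>
      let tw := rest.takeWhile (fun t => t.2.1 == start && t.2.2 == «end»)
      let chain_labels := (label :: tw.map (·.1)).reverse
      (PySem.Str.join "=" chain_labels, start, «end») :: pvALoop (rest.drop tw.length)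
  termination_by l => l.length
  decreasing_by simp

def remove_chain_rules (constituents : List (String × Int × Int)) : List (String × Int × Int) :=
  pvALoop (PySem.List.sorted2 constituents (fun x => x.2.1) (fun x => -x.2.2))

-- ===== PORT B =====
-- table.setdefault((start, end), []).append(label) mutates the entry in place:
-- exactly Dict.modify (start, end) [] (· ++ [label]).
def pvBStep (d : PySem.Dict (Int × Int) (List String)) (t : String × Int × Int) :
    PySem.Dict (Int × Int) (List String) :=
  d.modify (t.2.1, t.2.2) [] (· ++ [t.1])

def remove_chain_rules_alt (constituents : List (String × Int × Int)) : List (String × Int × Int) :=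
  (((PySem.List.sorted2 constituents (fun x => x.2.1) (fun x => -x.2.2)).foldl
      pvBStep PySem.Dict.empty).items).map
    (fun p => (PySem.Str.join "=" p.2.reverse, p.1.1, p.1.2))

-- ===== PRECONDITION & SPEC =====
def Spec_remove_chain_rules (constituents : List (String × Int × Int)) (out : List (String × Int × Int)) : Prop := out = remove_chain_rules_alt constituents
instance (constituents : List (String × Int × Int)) (out : List (String × Int × Int)) : Decidable (Spec_remove_chain_rules constituents out) := by unfold Spec_remove_chain_rules; infer_instance

-- ===== CLAIM (what is proved, stated in full; the proofs are below) =====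
def Claim_equal_remove_chain_rules : Prop := ∀ (constituents : List (String × Int × Int)), Dom_remove_chain_rules constituents → Spec_remove_chain_rules constituents (remove_chain_rules constituents)

-- ===== LEMMAS AND PROOFS =====

-- the comparison sorted2 uses (reverse = false): strict lexicographic on (start, -end)
def pvBef (a b : String × Int × Int) : Bool :=
  decide (a.2.1 < b.2.1) || (!decide (b.2.1 < a.2.1) && decide (-a.2.2 < -b.2.2))

-- "key a ≤ key b" as a Prop
def pvR (a b : String × Int × Int) : Prop :=
  a.2.1 < b.2.1 ∨ (a.2.1 = b.2.1 ∧ b.2.2 ≤ a.2.2)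

theorem pv_bef_true {a b : String × Int × Int} (h : pvBef a b = true) :
    a.2.1 < b.2.1 ∨ (a.2.1 = b.2.1 ∧ b.2.2 < a.2.2) := by
  simp [pvBef] at h; omega

theorem pv_bef_false {a b : String × Int × Int} (h : pvBef a b = false) : pvR b a := by
  simp [pvBef] at h; unfold pvR; omega

theorem pv_strict_trans {a b c : String × Int × Int}
    (h1 : a.2.1 < b.2.1 ∨ (a.2.1 = b.2.1 ∧ b.2.2 < a.2.2)) (h2 : pvR b c) : pvR a c := by
  unfold pvR at *; omega

theorem pv_insertBy_pairwise (x : String × Int × Int) (l : List (String × Int × Int))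
    (h : l.Pairwise pvR) : (PySem.List.insertBy pvBef x l).Pairwise pvR := by
  induction l with
  | nil => simp [PySem.List.insertBy]
  | cons y ys ih =>
    rw [List.pairwise_cons] at h
    by_cases hb : pvBef x y = true
    · simp only [PySem.List.insertBy, hb, if_true]
      refine List.Pairwise.cons ?_ (List.Pairwise.cons h.1 h.2)
      intro z hz
      rcases List.mem_cons.mp hz with rfl | hz
      · exact pv_strict_trans (pv_bef_true hb) (Or.inr ⟨rfl, le_refl _⟩)
      · exact pv_strict_trans (pv_bef_true hb) (h.1 z hz)
    · rw [Bool.not_eq_true] at hb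
      simp only [PySem.List.insertBy, hb]
      refine List.Pairwise.cons ?_ (ih h.2)
      intro z hz
      rcases (PySem.List.mem_insertBy pvBef x z ys).mp hz with rfl | hz
      · exact pv_bef_false hb
      · exact h.1 z hz

theorem pv_foldl_insertBy_pairwise (cs : List (String × Int × Int)) :
    ∀ acc : List (String × Int × Int), acc.Pairwise pvR →
      (cs.foldl (fun acc x => PySem.List.insertBy pvBef x acc) acc).Pairwise pvR := by
  induction cs with
  | nil => intro acc h; exact h
  | cons x rest ih => intro acc h; exact ih _ (pv_insertBy_pairwise x acc h)

theorem pv_sorted2_eq (cs : List (String × Int × Int)) :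
    PySem.List.sorted2 cs (fun x => x.2.1) (fun x => -x.2.2)
      = cs.foldl (fun acc x => PySem.List.insertBy pvBef x acc) [] := rfl

theorem pv_sorted_pairwise (cs : List (String × Int × Int)) :
    (PySem.List.sorted2 cs (fun x => x.2.1) (fun x => -x.2.2)).Pairwise pvR := by
  rw [pv_sorted2_eq]; exact pv_foldl_insertBy_pairwise cs [] (by simp)

theorem pv_drop_takeWhile {α : Type} (p : α → Bool) (l : List α) :
    l.drop (l.takeWhile p).length = l.dropWhile p := by
  induction l with
  | nil => rfl
  | cons x xs ih =>
    by_cases h : p x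
    · simp [h, ih]
    · simp [h]

-- the run grouping A computes, as (span, labels) pairs
def pvGather : List (String × Int × Int) → List ((Int × Int) × List String)
  | [] => []
  | x :: rest =>
      let tw := rest.takeWhile (fun t => t.2.1 == x.2.1 && t.2.2 == x.2.2)
      ((x.2.1, x.2.2), x.1 :: tw.map (·.1)) :: pvGather (rest.drop tw.length)
  termination_by l => l.length
  decreasing_by simp

def pvEmit (g : (Int × Int) × List String) : String × Int × Int :=
  (PySem.Str.join "=" g.2.reverse, g.1.1, g.1.2)

def pvP0 (k : Int × Int) (t : String × Int × Int) : Bool :=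
  t.2.1 == k.1 && t.2.2 == k.2

theorem pvGather_cons (x : String × Int × Int) (rest : List (String × Int × Int)) :
    pvGather (x :: rest)
      = ((x.2.1, x.2.2), x.1 :: (rest.takeWhile (pvP0 (x.2.1, x.2.2))).map (·.1))
          :: pvGather (rest.dropWhile (pvP0 (x.2.1, x.2.2))) := by
  rw [pvGather, ← pv_drop_takeWhile]; rfl

theorem pv_aloop_gather (xs : List (String × Int × Int)) :
    pvALoop xs = (pvGather xs).map pvEmit := by
  induction xs using pvGather.induct with
  | case1 => rw [pvALoop, pvGather]; rfl
  | case2 x rest tw ih =>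
    obtain ⟨l, s, e⟩ := x
    rw [pvALoop, pvGather]
    simp only [List.map_cons]
    exact congrArg₂ _ rfl ih

theorem pv_modify_last (pre : List ((Int × Int) × List String)) (k0 : Int × Int)
    (ls : List String) (f : List String → List String) (hne : ∀ p ∈ pre, p.1 ≠ k0) :
    ((PySem.Dict.mk (pre ++ [(k0, ls)])).modify k0 [] f).items = pre ++ [(k0, f ls)] := by
  have hfind : List.find? (fun p => p.1 == k0) (pre ++ [(k0, ls)]) = some (k0, ls) := by
    induction pre with
    | nil => simp
    | cons q qs ih =>
      have hq : (q.1 == k0) = false := by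
        simpa using hne q (by simp)
      simp only [List.cons_append, List.find?_cons, hq]
      exact ih (fun p hp => hne p (by simp [hp]))
  have hcont : (PySem.Dict.mk (pre ++ [(k0, ls)])).contains k0 = true := by
    simp [PySem.Dict.contains]
  simp only [PySem.Dict.modify, PySem.Dict.insert, PySem.Dict.getD, PySem.Dict.get?,
    hcont, if_true, hfind, Option.map_some, Option.getD_some]
  rw [List.map_append]
  congr 1
  · calc List.map (fun p => if (p.1 == k0) = true then (k0, f ls) else p) pre
        = List.map id pre := by
          apply List.map_congr_left
          intro p hp
          simp [show (p.1 == k0) = false by simpa using hne p hp]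
      _ = pre := List.map_id pre
  · simp

theorem pv_modify_fresh (l : List ((Int × Int) × List String)) (k : Int × Int)
    (f : List String → List String) (h : ∀ p ∈ l, p.1 ≠ k) :
    ((PySem.Dict.mk l).modify k [] f).items = l ++ [(k, f [])] := by
  have hcont : (PySem.Dict.mk l).contains k = false := by
    simp only [PySem.Dict.contains, List.any_eq_false]
    intro p hp; simpa using h p hp
  have hfind : List.find? (fun p => p.1 == k) l = none := by
    rw [List.find?_eq_none]
    intro p hp; simpa using h p hp
  simp [PySem.Dict.modify, PySem.Dict.insert, PySem.Dict.getD, PySem.Dict.get?, hcont, hfind]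

theorem pv_dict (xs : List (String × Int × Int)) :
    ∀ (pre : List ((Int × Int) × List String)) (k0 : Int × Int) (ls : List String),
    (∀ p ∈ pre, ∀ x ∈ xs, p.1 ≠ (x.2.1, x.2.2)) →
    (∀ p ∈ pre, p.1 ≠ k0) →
    (∀ x ∈ xs, k0.1 < x.2.1 ∨ (k0.1 = x.2.1 ∧ x.2.2 ≤ k0.2)) →
    xs.Pairwise pvR →
    (xs.foldl pvBStep (PySem.Dict.mk (pre ++ [(k0, ls)]))).items
      = pre ++ [(k0, ls ++ (xs.takeWhile (pvP0 k0)).map (·.1))]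
          ++ pvGather (xs.dropWhile (pvP0 k0)) := by
  induction xs with
  | nil => intro pre k0 ls _ _ _ _; simp [pvGather]
  | cons x rest ih =>
    intro pre k0 ls hpre hne hk0 hsort
    rw [List.pairwise_cons] at hsort
    by_cases hx : pvP0 k0 x = true
    · have hx' : x.2.1 = k0.1 ∧ x.2.2 = k0.2 := by
        simpa [pvP0] using hx
      have hspan : (x.2.1, x.2.2) = k0 := by rw [hx'.1, hx'.2]
      have hstep : pvBStep (PySem.Dict.mk (pre ++ [(k0, ls)])) x
          = PySem.Dict.mk (pre ++ [(k0, ls ++ [x.1])]) := by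
        apply PySem.Dict.ext
        rw [pvBStep, hspan, pv_modify_last pre k0 ls _ hne]
      rw [List.foldl_cons, hstep,
        ih pre k0 (ls ++ [x.1])
          (fun p hp y hy => hpre p hp y (List.mem_cons_of_mem x hy))
          hne
          (fun y hy => by
            have hr := hsort.1 y hy
            unfold pvR at hr
            rw [← hx'.1, ← hx'.2] at *
            exact hr)
          hsort.2]
      rw [List.takeWhile_cons_of_pos hx, List.dropWhile_cons_of_pos hx]
      simp
    · have hx' : x.2.1 = k0.1 → ¬x.2.2 = k0.2 := by
        simpa [pvP0] using hx
      have hspan : (x.2.1, x.2.2) ≠ k0 := by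
        intro hc
        exact hx' (congrArg Prod.fst hc) (congrArg Prod.snd hc)
      have hstep : pvBStep (PySem.Dict.mk (pre ++ [(k0, ls)])) x
          = PySem.Dict.mk ((pre ++ [(k0, ls)]) ++ [((x.2.1, x.2.2), [x.1])]) := by
        apply PySem.Dict.ext
        rw [pvBStep]
        apply pv_modify_fresh (pre ++ [(k0, ls)]) (x.2.1, x.2.2) _
        intro p hp
        rcases List.mem_append.mp hp with hp | hp
        · exact hpre p hp x (List.mem_cons_self)
        · rw [List.mem_singleton.mp hp]
          exact fun hc => hspan hc.symm
      have hstrict : k0.1 < x.2.1 ∨ (k0.1 = x.2.1 ∧ x.2.2 < k0.2) := by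
        rcases hk0 x (List.mem_cons_self) with h | h
        · exact Or.inl h
        · exact Or.inr ⟨h.1, lt_of_le_of_ne h.2 (fun he => hx' h.1.symm he)⟩
      have hpre' : ∀ p ∈ pre ++ [(k0, ls)], ∀ y ∈ rest, p.1 ≠ (y.2.1, y.2.2) := by
        intro p hp y hy
        rcases List.mem_append.mp hp with hp | hp
        · exact hpre p hp y (List.mem_cons_of_mem x hy)
        · rw [List.mem_singleton.mp hp]
          intro hc
          have hr := hsort.1 y hy
          unfold pvR at hr
          have h1 : k0.1 = y.2.1 := congrArg Prod.fst hc
          have h2 : k0.2 = y.2.2 := congrArg Prod.snd hc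
          omega
      have hne' : ∀ p ∈ pre ++ [(k0, ls)], p.1 ≠ (x.2.1, x.2.2) := by
        intro p hp
        rcases List.mem_append.mp hp with hp | hp
        · exact hpre p hp x (List.mem_cons_self)
        · rw [List.mem_singleton.mp hp]
          exact fun hc => hspan hc.symm
      have hk0' : ∀ y ∈ rest, (x.2.1, x.2.2).1 < y.2.1 ∨ ((x.2.1, x.2.2).1 = y.2.1 ∧ y.2.2 ≤ (x.2.1, x.2.2).2) := by
        intro y hy
        have hr := hsort.1 y hy
        unfold pvR at hr
        exact hr
      rw [List.foldl_cons, hstep,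
        ih (pre ++ [(k0, ls)]) (x.2.1, x.2.2) [x.1] hpre' hne' hk0' hsort.2]
      rw [List.takeWhile_cons_of_neg (by simp [hx]), List.dropWhile_cons_of_neg (by simp [hx])]
      rw [pvGather_cons]
      simp

-- ===== VERDICT (by name: the statement is the Claim_ definition above) =====
theorem remove_chain_rules_spec : Claim_equal_remove_chain_rules := by
  intro cs _
  unfold Spec_remove_chain_rules remove_chain_rules remove_chain_rules_alt
  have hpw := pv_sorted_pairwise cs
  cases hs : PySem.List.sorted2 cs (fun x => x.2.1) (fun x => -x.2.2) with
  | nil => simp [pvALoop, PySem.Dict.empty]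
  | cons x rest =>
    rw [hs] at hpw
    rw [List.pairwise_cons] at hpw
    have hstep0 : pvBStep PySem.Dict.empty x
        = PySem.Dict.mk ([] ++ [((x.2.1, x.2.2), [x.1])]) := by
      apply PySem.Dict.ext
      rw [pvBStep]
      exact pv_modify_fresh [] (x.2.1, x.2.2) _ (by simp)
    rw [pv_aloop_gather, List.foldl_cons, hstep0,
      pv_dict rest [] (x.2.1, x.2.2) [x.1]
        (by simp)
        (by simp)
        (fun y hy => by
          have hr := hpw.1 y hy
          unfold pvR at hr
          exact hr)
        hpw.2]
    rw [pvGather_cons]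
    simp [pvEmit]
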